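-- pv_equiv track=rewrite | github.com/AyaulymNassipkali/ADS | lab1/Ctask1.py | process
-- ===== SOURCE A (Python) =====
-- def process(st):
--     ans = []
--     for ch in st:
--         if ch == "#":
--             if ans:  # чтобы не было ошибки, если список пуст
--                 ans.pop()
--         else:
--             ans.append(ch)
--     return "".join(ans)
-- ===== SOURCE B (Python) =====
-- def process(st):
--     out = []
--     skip = 0
--     for ch in reversed(st):
--         if ch == "#":
--             skip += 1
--         elif skip > 0:
--             skip -= 1
--         else:
--             out.append(ch)
--     return "".join(reversed(out))
-- ===== Notes on version B (the rewrite author's own statement) =====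
-- stated objective: alternative
-- what changed: Replaces the left-to-right stack (append/pop list) with a right-to-left scan keeping only an integer skip counter, emitting survivors in reverse and reversing once at the end.
import Mathlib
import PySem

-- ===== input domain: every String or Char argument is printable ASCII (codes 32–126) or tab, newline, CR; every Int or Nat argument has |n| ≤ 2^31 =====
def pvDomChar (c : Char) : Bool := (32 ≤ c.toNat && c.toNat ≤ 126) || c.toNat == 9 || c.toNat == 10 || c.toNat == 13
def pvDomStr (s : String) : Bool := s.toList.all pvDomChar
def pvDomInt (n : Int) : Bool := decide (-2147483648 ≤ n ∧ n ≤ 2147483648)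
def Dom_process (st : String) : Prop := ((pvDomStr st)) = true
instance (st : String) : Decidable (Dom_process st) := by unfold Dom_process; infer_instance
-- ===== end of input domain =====

-- B replaces A's left-to-right append/pop stack with a right-to-left scan and a skip counter (objective: alternative, same cost).

-- ===== PORT A =====
-- loop body: '#' pops the last kept char (if any), otherwise append ch
def processStep (ans : List Char) (ch : Char) : List Char :=
  if ch = '#' then ans.dropLast else ans ++ [ch]

def process (st : String) : String :=
  String.mk (st.toList.foldl processStep [])

-- ===== PORT B =====
-- loop body over reversed(st): state (out, skip); skip counts pending '#'s (never negative, so Nat)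
def processAltStep (s : List Char × Nat) (ch : Char) : List Char × Nat :=
  if ch = '#' then (s.1, s.2 + 1)
  else if s.2 > 0 then (s.1, s.2 - 1)
  else (s.1 ++ [ch], s.2)

def process_alt (st : String) : String :=
  String.mk ((st.toList.reverse.foldl processAltStep ([], 0)).1.reverse)

-- ===== PRECONDITION & SPEC =====
def Spec_process (st : String) (out : String) : Prop := out = process_alt st
instance (st : String) (out : String) : Decidable (Spec_process st out) := by unfold Spec_process; infer_instance

-- ===== CLAIM (what is proved, stated in full; the proofs are below) =====
def Claim_equal_process : Prop := ∀ (st : String), Dom_process st → Spec_process st (process st)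

-- ===== LEMMAS AND PROOFS =====

-- the kept characters (in reversed/emission order) of the B-scan of r with initial skip s
def emit : List Char → Nat → List Char
  | [], _ => []
  | c :: r, s =>
    if c = '#' then emit r (s + 1)
    else if s > 0 then emit r (s - 1)
    else c :: emit r s

theorem foldB_emit (r : List Char) : ∀ (out : List Char) (s : Nat),
    (r.foldl processAltStep (out, s)).1 = out ++ emit r s := by
  induction r with
  | nil => intro out s; simp [emit]
  | cons c r ih =>
    intro out s
    simp only [List.foldl_cons, processAltStep, emit]
    split_ifs with h1 h2 <;> simp [ih, List.append_assoc]

theorem emit_key (l : List Char) : ∀ (s : Nat),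
    (emit l.reverse s).reverse = (List.dropLast)^[s] (l.foldl processStep []) := by
  induction l using List.reverseRecOn with
  | nil =>
    intro s
    simp only [List.reverse_nil, emit, List.reverse_nil, List.foldl_nil]
    induction s with
    | zero => rfl
    | succ n ih => rw [Function.iterate_succ_apply]; simpa using ih
  | append_singleton l c ih =>
    intro s
    rw [List.reverse_append, List.reverse_singleton, List.singleton_append,
        List.foldl_append, List.foldl_cons, List.foldl_nil]
    simp only [emit, processStep]
    by_cases hc : c = '#'
    · simp only [hc, if_true]
      rw [ih (s + 1), Function.iterate_succ_apply]
    · rw [if_neg hc, if_neg hc]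
      rcases Nat.eq_zero_or_pos s with hs | hs
      · subst hs
        simp [ih 0]
      · rw [if_pos hs, ih (s - 1)]
        have : s = (s - 1) + 1 := (Nat.succ_pred_eq_of_pos hs).symm
        rw [this, Function.iterate_succ_apply, List.dropLast_concat, Nat.add_sub_cancel]

-- ===== VERDICT (by name: the statement is the Claim_ definition above) =====
theorem process_spec : Claim_equal_process := by
  intro st _
  unfold Spec_process process process_alt
  rw [foldB_emit, List.nil_append]
  have := emit_key st.toList 0
  simp only [Function.iterate_zero, id] at this
  rw [this]
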